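-- pv_equiv track=rewrite | github.com/KewBridge/specimens2illustrations | functions/boundingBoxFunctions.py | colorLogic
-- ===== SOURCE A (Python) =====
-- def colorLogic(n: int) -> list[list[int]]:
--     '''Returns the first n colors of the rainbow in BGR format.'''
--     res = [[2, 0, 0]]
--
--     current2idx = next_idx = 0
--
--     while n != 1:
--         new_item = [i for i in res[-1]]
--
--         if new_item[current2idx] == 0:
--             current2idx = next_idx
--
--         next_idx = (current2idx + 1) % 3
--
--         if new_item[next_idx] == 2:
--             new_item[current2idx] -= 1
--         else:
--             new_item[next_idx] += 1
--
--         res.append(new_item)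
--         n -= 1
--
--     return [[(255, 127, 0)[j] for j in i] for i in res]
-- ===== SOURCE B (Python) =====
-- _CYCLE = [[0, 255, 255], [0, 127, 255], [0, 0, 255], [127, 0, 255],
--           [255, 0, 255], [255, 0, 127], [255, 0, 0], [255, 127, 0],
--           [255, 255, 0], [127, 255, 0], [0, 255, 0], [0, 255, 127]]
--
--
-- def colorLogic(n: int) -> list[list[int]]:
--     '''Returns the first n colors of the rainbow in BGR format.'''
--     return [list(_CYCLE[i % 12]) for i in range(n)]
-- ===== Notes on version B (the rewrite author's own statement) =====
-- stated objective: faster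
-- what changed: Replaces A's stateful rainbow state machine (mutating a raw triple step by step, then mapping every triple through a palette tuple) with a precomputed literal 12-entry BGR cycle indexed modulo 12 over range(n); Pre_ excludes n <= 0, where A's while-loop never terminates (B returns []).
import Mathlib
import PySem

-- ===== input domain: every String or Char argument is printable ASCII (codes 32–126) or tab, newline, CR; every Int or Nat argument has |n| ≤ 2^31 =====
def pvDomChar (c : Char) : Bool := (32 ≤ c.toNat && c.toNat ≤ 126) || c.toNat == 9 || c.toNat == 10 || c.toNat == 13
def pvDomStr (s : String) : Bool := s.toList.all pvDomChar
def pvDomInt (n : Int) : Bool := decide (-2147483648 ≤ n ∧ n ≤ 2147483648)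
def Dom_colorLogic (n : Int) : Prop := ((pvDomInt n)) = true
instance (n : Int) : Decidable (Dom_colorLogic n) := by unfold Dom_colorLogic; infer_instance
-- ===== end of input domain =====

-- B replaces A's stateful rainbow state machine by a precomputed literal
-- 12-entry BGR cycle indexed modulo 12 (objective: simpler).


-- ===== PORT A =====
-- one iteration of A's while-loop body: from (last item, current2idx, next_idx)
-- to (new_item, current2idx', next_idx').  All indices stay in {0,1,2} and items
-- have length 3, so List.getD/set are exact for Python's item[i] here.
def colorStepA (s : List Int × Nat × Nat) : List Int × Nat × Nat :=
  let item := s.1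
  let c2 := if item.getD s.2.1 0 = 0 then s.2.2 else s.2.1
  let nx := (c2 + 1) % 3
  let item' := if item.getD nx 0 = 2
               then item.set c2 (item.getD c2 0 - 1)
               else item.set nx (item.getD nx 0 + 1)
  (item', c2, nx)

-- the while-loop: for n ≥ 1 it runs exactly n-1 times (fuel = (n-1).toNat)
def colorLoopA : Nat → List (List Int) → Nat → Nat → List (List Int)
  | 0, res, _, _ => res
  | k+1, res, c2, nx =>
    let s := colorStepA (res.getLastD [2, 0, 0], c2, nx)
    colorLoopA k (res ++ [s.1]) s.2.1 s.2.2

def colorLogic (n : Int) : List (List Int) :=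
  (colorLoopA (n - 1).toNat [[2, 0, 0]] 0 0).map
    (fun i => i.map (fun j => PySem.List.pyGetD [(255 : Int), 127, 0] j 0))

-- ===== PORT B =====
def colorCycle : List (List Int) :=
  [[0, 255, 255], [0, 127, 255], [0, 0, 255], [127, 0, 255],
   [255, 0, 255], [255, 0, 127], [255, 0, 0], [255, 127, 0],
   [255, 255, 0], [127, 255, 0], [0, 255, 0], [0, 255, 127]]

def colorLogic_alt (n : Int) : List (List Int) :=
  (PySem.List.pyRange 0 n 1).map
    (fun i => PySem.List.pyGetD colorCycle (PySem.Int.mod i 12) [])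

-- ===== PRECONDITION & SPEC =====
-- A's while-loop never terminates for n ≤ 0 (n only decreases and never hits 1),
-- so Pre_ admits exactly the inputs on which A returns: n ≥ 1.
def Pre_colorLogic (n : Int) : Prop := 1 ≤ n
instance (n : Int) : Decidable (Pre_colorLogic n) := by unfold Pre_colorLogic; infer_instance
def pvWitness_colorLogic : Int := 5

def Spec_colorLogic (n : Int) (out : List (List Int)) : Prop := out = colorLogic_alt n
instance (n : Int) (out : List (List Int)) : Decidable (Spec_colorLogic n out) := by unfold Spec_colorLogic; infer_instance

-- ===== CLAIM (what is proved, stated in full; the proofs are below) =====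
def Claim_equal_colorLogic : Prop := ∀ (n : Int), Dom_colorLogic n → Pre_colorLogic n → Spec_colorLogic n (colorLogic n)

-- ===== LEMMAS AND PROOFS =====

-- iterate colorStepA k times
def iterA : Nat → (List Int × Nat × Nat) → (List Int × Nat × Nat)
  | 0, s => s
  | k+1, s => iterA k (colorStepA s)

lemma iterA_add (a b : Nat) (s : List Int × Nat × Nat) :
    iterA (a + b) s = iterA a (iterA b s) := by
  induction b generalizing s with
  | zero => rfl
  | succ b ih =>
    have : a + (b + 1) = (a + b) + 1 := by omega
    rw [this]
    show iterA (a + b) (colorStepA s) = _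
    rw [ih]
    rfl

lemma loopA_eq (k : Nat) : ∀ (pre : List (List Int)) (last : List Int) (c2 nx : Nat),
    colorLoopA k (pre ++ [last]) c2 nx =
      pre ++ last :: (List.range k).map (fun j => (iterA (j + 1) (last, c2, nx)).1) := by
  induction k with
  | zero => intro pre last c2 nx; simp [colorLoopA]
  | succ k ih =>
    intro pre last c2 nx
    show colorLoopA k ((pre ++ [last]) ++ [(colorStepA ((pre ++ [last]).getLastD [2,0,0], c2, nx)).1]) _ _ = _
    rw [List.getLastD_concat]
    rw [ih]
    rw [List.range_succ_eq_map]
    simp only [List.map_cons, List.map_map, List.append_assoc, List.cons_append,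
      List.nil_append]
    rfl

def s0 : List Int × Nat × Nat := ([2, 0, 0], 0, 0)

lemma iterA_thirteen : iterA 13 s0 = iterA 1 s0 := by decide

lemma iterA_shift (j : Nat) (hj : 1 ≤ j) : iterA (j + 12) s0 = iterA j s0 := by
  have h1 : j + 12 = (j - 1) + 13 := by omega
  have h2 : j = (j - 1) + 1 := by omega
  rw [h1, iterA_add, iterA_thirteen, ← iterA_add, ← h2]

lemma small_eq : ∀ r : Nat, r < 13 →
    ((iterA r s0).1.map (fun j => PySem.List.pyGetD [(255 : Int), 127, 0] j 0))
      = colorCycle.getD (r % 12) [] := by decide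

lemma cell_eq (j : Nat) :
    ((iterA j s0).1.map (fun j => PySem.List.pyGetD [(255 : Int), 127, 0] j 0))
      = colorCycle.getD (j % 12) [] := by
  induction j using Nat.strong_induction_on with
  | _ j ih =>
    by_cases h : j < 13
    · exact small_eq j h
    · have hj : j = (j - 12) + 12 := by omega
      rw [hj, iterA_shift (j - 12) (by omega), ih (j - 12) (by omega)]
      congr 1
      omega

lemma alt_eq (n : Int) :
    colorLogic_alt n = (List.range n.toNat).map (fun k => colorCycle.getD (k % 12) []) := by
  unfold colorLogic_alt
  rw [PySem.List.pyRange_one, List.map_map]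
  have h0 : n - 0 = n := by ring
  rw [h0]
  congr 1
  funext k
  show PySem.List.pyGetD colorCycle (PySem.Int.mod ((0 : Int) + (k : Int)) 12) [] = _
  rw [zero_add]
  have hm : PySem.Int.mod ((k : Int)) (((12 : Nat) : Int)) = (((k % 12 : Nat) : Int)) :=
    PySem.Int.mod_natCast k 12
  simp only [Nat.cast_ofNat] at hm
  rw [hm]
  rw [PySem.List.pyGetD_natCast]

-- ===== VERDICT (by name: the statement is the Claim_ definition above) =====
theorem colorLogic_spec : Claim_equal_colorLogic := by
  intro n _ hpre
  unfold Spec_colorLogic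
  unfold colorLogic
  rw [show ([[2, 0, 0]] : List (List Int)) = [] ++ [[2, 0, 0]] from rfl, loopA_eq, alt_eq]
  have hn : n.toNat = (n - 1).toNat + 1 := by
    unfold Pre_colorLogic at hpre; omega
  rw [hn, List.range_succ_eq_map]
  simp only [List.nil_append, List.map_cons, List.map_map]
  congr 1
  congr 1
  funext j
  exact cell_eq (j + 1)
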